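-- pv_equiv track=rewrite | github.com/sorrowoMan/nsgablack | utils/viz/app.py | _aggregate_health
-- ===== SOURCE A (Python) =====
-- from typing import Any, Callable, Dict, List, Optional, Tuple
--
-- def _aggregate_health(statuses: List[str]) -> str:
--     normalized = [str(s or "").upper() for s in statuses if str(s or "").strip()]
--     if not normalized:
--         return "INFO"
--     if any(s == "WARN" for s in normalized):
--         return "WARN"
--     if all(s == "OK" for s in normalized):
--         return "OK"
--     return "INFO"
-- ===== SOURCE B (Python) =====
-- _SEVERITY = {"WARN": 2, "OK": 0}  # anything else (non-blank) ranks 1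
-- _LABEL = ["OK", "INFO", "WARN"]   # label for each severity rank
--
-- def _aggregate_health(statuses):
--     # Reduce to the worst severity rank seen (a max over a 3-level lattice),
--     # then translate that rank back to a label; -1 marks "nothing valid seen".
--     worst = -1
--     for x in statuses:
--         t = str(x or "")
--         if t.strip():
--             worst = max(worst, _SEVERITY.get(t.upper(), 1))
--     return "INFO" if worst < 0 else _LABEL[worst]
-- ===== Notes on version B (the rewrite author's own statement) =====
-- stated objective: alternative
-- what changed: Replaces the filter-then-any()-then-all() boolean decision chain by a max-reduction over a 3-level severity lattice (WARN=2, other=1, OK=0) with a rank-to-label table lookup.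
import Mathlib
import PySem

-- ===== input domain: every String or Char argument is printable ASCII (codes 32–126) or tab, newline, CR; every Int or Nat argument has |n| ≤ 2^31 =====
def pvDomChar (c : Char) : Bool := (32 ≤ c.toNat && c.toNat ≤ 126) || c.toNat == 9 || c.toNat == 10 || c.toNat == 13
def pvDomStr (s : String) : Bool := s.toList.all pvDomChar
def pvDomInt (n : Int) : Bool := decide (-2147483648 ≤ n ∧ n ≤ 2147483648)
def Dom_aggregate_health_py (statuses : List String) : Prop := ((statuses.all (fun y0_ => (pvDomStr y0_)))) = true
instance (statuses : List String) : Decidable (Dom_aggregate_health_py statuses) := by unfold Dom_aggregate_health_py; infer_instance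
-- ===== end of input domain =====

-- B replaces A's boolean any()/all() passes by a max-reduction to a worst severity rank
-- (WARN=2, other=1, OK=0) looked up in a label table; alternative decomposition, same O(n).

-- ===== PORT A =====
-- Python `str(s or "")` on a string s is s itself (s when s ≠ "", "" when s = ""); exact on strings.
def aggregate_health_py (statuses : List String) : String :=
  let normalized := (statuses.filter (fun s => PySem.Str.strip s ≠ "")).map PySem.Str.upper
  if normalized = [] then "INFO"
  else if normalized.any (fun s => s == "WARN") then "WARN"
  else if normalized.all (fun s => s == "OK") then "OK"
  else "INFO"

-- ===== PORT B =====
def sevDict : PySem.Dict String Int := PySem.Dict.mk [("WARN", 2), ("OK", 0)]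
def labelList : List String := ["OK", "INFO", "WARN"]

-- Source B's loop: worst = max(worst, _SEVERITY.get(t.upper(), 1)) over non-blank entries.
def aggregate_health_py_alt (statuses : List String) : String :=
  let worst := statuses.foldl (fun w x =>
    if PySem.Str.strip x ≠ "" then max w (PySem.Dict.getD sevDict (PySem.Str.upper x) 1) else w) (-1 : Int)
  -- `_LABEL[worst]`: worst ∈ {0,1,2} whenever worst ≥ 0, so the index never misses (getD default unreachable)
  if worst < 0 then "INFO" else (PySem.List.pyGet? labelList worst).getD ""

-- ===== PRECONDITION & SPEC =====
def Spec_aggregate_health_py (statuses : List String) (out : String) : Prop := out = aggregate_health_py_alt statuses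
instance (statuses : List String) (out : String) : Decidable (Spec_aggregate_health_py statuses out) := by unfold Spec_aggregate_health_py; infer_instance

-- ===== CLAIM =====
def Claim_equal_aggregate_health_py : Prop := ∀ (statuses : List String), Dom_aggregate_health_py statuses → Spec_aggregate_health_py statuses (aggregate_health_py statuses)

-- ===== LEMMAS AND PROOFS =====

def sev (s : String) : Int := PySem.Dict.getD sevDict s 1

theorem sev_eq (s : String) : sev s = if s = "WARN" then 2 else if s = "OK" then 0 else 1 := by
  by_cases h1 : s = "WARN"
  · subst h1; decide
  · by_cases h2 : s = "OK"
    · subst h2; decide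
    · have h1' : ¬ ("WARN" = s) := fun h => h1 h.symm
      have h2' : ¬ ("OK" = s) := fun h => h2 h.symm
      simp [sev, sevDict, PySem.Dict.getD, PySem.Dict.get?, h1, h2, h1', h2']

theorem sev_range (s : String) : 0 ≤ sev s ∧ sev s ≤ 2 := by
  rw [sev_eq]; split_ifs <;> norm_num

-- worst severity of a list of (already normalized) statuses
def maxSev (N : List String) : Int := N.foldl (fun a s => max a (sev s)) (-1)

theorem foldl_max_shift (N : List String) : ∀ w : Int, -1 ≤ w →
    N.foldl (fun a s => max a (sev s)) w = max w (maxSev N) := by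
  induction N with
  | nil => intro w hw; simp only [maxSev, List.foldl]; omega
  | cons s N ih =>
    intro w hw
    have h0 := sev_range s
    have h1 : maxSev (s :: N) = max (max (-1) (sev s)) (maxSev N) := by
      simp only [maxSev, List.foldl]
      exact ih _ (by omega)
    rw [List.foldl_cons, ih _ (by omega), h1]
    omega

theorem maxSev_cons (s : String) (N : List String) :
    maxSev (s :: N) = max (sev s) (maxSev N) := by
  have h0 := sev_range s
  simp only [maxSev, List.foldl_cons]
  rw [foldl_max_shift _ _ (by omega)]
  have hdef : List.foldl (fun a s => max a (sev s)) (-1) N = maxSev N := rfl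
  omega

theorem maxSev_bounds (N : List String) : -1 ≤ maxSev N ∧ maxSev N ≤ 2 := by
  induction N with
  | nil => simp [maxSev]
  | cons s N ih =>
    have := sev_range s
    rw [maxSev_cons]
    omega

theorem maxSev_nonneg (N : List String) (h : N ≠ []) : 0 ≤ maxSev N := by
  cases N with
  | nil => exact absurd rfl h
  | cons s N =>
    have h0 := sev_range s
    have := maxSev_bounds N
    rw [maxSev_cons]; omega

theorem maxSev_warn (N : List String) : (N.any (fun s => s == "WARN")) = true ↔ maxSev N = 2 := by
  induction N with
  | nil => simp [maxSev]
  | cons s N ih =>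
    have hb := maxSev_bounds N
    have hr := sev_range s
    have hs : sev s = 2 ↔ s = "WARN" := by rw [sev_eq]; split_ifs <;> simp_all
    rw [maxSev_cons]
    simp only [List.any_cons, Bool.or_eq_true, beq_iff_eq, ih]
    rw [← hs]
    omega

theorem maxSev_ok (N : List String) : (N.all (fun s => s == "OK")) = true ↔ maxSev N ≤ 0 := by
  induction N with
  | nil => simp [maxSev]
  | cons s N ih =>
    have hb := maxSev_bounds N
    have hr := sev_range s
    have hs : sev s = 0 ↔ s = "OK" := by rw [sev_eq]; split_ifs <;> simp_all
    rw [maxSev_cons]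
    simp only [List.all_cons, Bool.and_eq_true, beq_iff_eq, ih]
    rw [← hs]
    omega

-- B's fold over raw statuses equals a max-fold over A's normalized list
theorem fold_eq_maxSev (xs : List String) (w : Int) :
    xs.foldl (fun w x =>
      if PySem.Str.strip x ≠ "" then max w (PySem.Dict.getD sevDict (PySem.Str.upper x) 1) else w) w
    = (((xs.filter (fun s => PySem.Str.strip s ≠ "")).map PySem.Str.upper).foldl
        (fun a s => max a (sev s)) w) := by
  induction xs generalizing w with
  | nil => rfl
  | cons x xs ih =>
    by_cases h : PySem.Str.strip x = ""
    · rw [List.foldl_cons, if_neg (by simp [h]), List.filter_cons_of_neg (by simp [h])]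
      exact ih w
    · rw [List.foldl_cons, if_pos h, List.filter_cons_of_pos (by simp [h]),
        List.map_cons, List.foldl_cons]
      exact ih _

-- ===== VERDICT =====
theorem aggregate_health_py_spec : Claim_equal_aggregate_health_py := by
  intro statuses _
  unfold Spec_aggregate_health_py aggregate_health_py aggregate_health_py_alt
  rw [fold_eq_maxSev, foldl_max_shift _ _ (by norm_num)]
  set N := (statuses.filter (fun s => PySem.Str.strip s ≠ "")).map PySem.Str.upper with hN
  by_cases hE : N = []
  · simp [hE, maxSev]
  · have hnn := maxSev_nonneg N hE
    have hb := maxSev_bounds N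
    have hmax : max (-1 : Int) (maxSev N) = maxSev N := by omega
    rw [hmax]
    simp only [hE, if_false]
    by_cases hw : N.any (fun s => s == "WARN") = true
    · have h2 := (maxSev_warn N).mp hw
      rw [h2]
      simp only [hw, if_true]
      decide
    · have h2 : maxSev N ≠ 2 := fun h => hw ((maxSev_warn N).mpr h)
      by_cases ho : N.all (fun s => s == "OK") = true
      · have h0 : maxSev N = 0 := by have := (maxSev_ok N).mp ho; omega
        rw [h0]
        simp only [hw, ho, if_true]
        decide
      · have hno : ¬ maxSev N ≤ 0 := fun h => ho ((maxSev_ok N).mpr h)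
        have h1 : maxSev N = 1 := by omega
        rw [h1]
        simp only [hw, ho]
        decide
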